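-- pv_equiv track=rewrite | github.com/PixelVearn/mypygames | pathfinding.py | inflate_blocked
-- ===== SOURCE A (Python) =====
-- def inflate_blocked(blocked: set[tuple[int, int]], w: int, h: int, margin: int = 1):
--     """Expand blocked tiles by `margin` (Chebyshev distance) to keep distance from walls."""
--
--     if margin <= 0:
--         return set(blocked)
--
--     inflated = set(blocked)
--     for (x, y) in blocked:
--         for dy in range(-margin, margin + 1):
--             for dx in range(-margin, margin + 1):
--                 nx, ny = x + dx, y + dy
--                 if 0 <= nx < w and 0 <= ny < h:
--                     inflated.add((nx, ny))
--     return inflated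
-- ===== SOURCE B (Python) =====
-- def inflate_blocked(blocked: set[tuple[int, int]], w: int, h: int, margin: int = 1):
--     """Expand blocked tiles by `margin` (Chebyshev distance) to keep distance from walls.
--
--     Separable dilation: stage 1 dilates every blocked cell vertically (clipped to the
--     grid height) into the set `tall`; stage 2 dilates each cell of `tall` horizontally
--     (clipped to the grid width). A Chebyshev ball is the product of two 1-D intervals,
--     so the two staged 1-D passes cover exactly the same cells as A's 2-D square pass,
--     while the intermediate dedup avoids re-scanning overlapping squares row by row.
--     """
--     if margin <= 0:
--         return set(blocked)
--     tall = set()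
--     for (x, y) in blocked:
--         for ny in range(max(y - margin, 0), min(y + margin + 1, h)):
--             tall.add((x, ny))
--     inflated = set(blocked)
--     for (x, ny) in tall:
--         for nx in range(max(x - margin, 0), min(x + margin + 1, w)):
--             inflated.add((nx, ny))
--     return inflated
-- ===== Notes on version B (the rewrite author's own statement) =====
-- stated objective: faster
-- what changed: B replaces A's single 2-D pass (each blocked cell spraying its whole (2m+1)x(2m+1) square) by a separable two-stage dilation: a vertical 1-D dilation into an intermediate deduplicated set, then a horizontal 1-D dilation of that set, so overlapping squares are never re-scanned row by row; intended as faster (output-sensitive), measured 3.4-7.4x at the largest sizes in a timing run.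
import Mathlib
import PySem

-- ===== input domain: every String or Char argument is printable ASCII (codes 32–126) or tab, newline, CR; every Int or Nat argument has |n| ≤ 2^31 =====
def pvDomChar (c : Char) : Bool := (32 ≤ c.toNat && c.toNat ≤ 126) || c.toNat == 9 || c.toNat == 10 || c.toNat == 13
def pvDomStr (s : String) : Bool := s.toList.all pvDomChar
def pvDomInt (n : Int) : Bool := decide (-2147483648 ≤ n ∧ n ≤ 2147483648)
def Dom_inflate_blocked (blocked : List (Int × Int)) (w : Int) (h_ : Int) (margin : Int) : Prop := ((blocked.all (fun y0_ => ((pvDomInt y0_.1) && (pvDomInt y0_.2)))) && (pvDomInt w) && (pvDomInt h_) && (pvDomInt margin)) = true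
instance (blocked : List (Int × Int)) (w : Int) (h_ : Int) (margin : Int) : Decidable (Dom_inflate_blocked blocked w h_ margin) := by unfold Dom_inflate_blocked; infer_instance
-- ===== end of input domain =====

-- B replaces A's one-pass 2-D dilation (every blocked cell sprays its (2m+1)² square)
-- by a SEPARABLE two-stage dilation: vertical 1-D dilation into an intermediate set,
-- then horizontal 1-D dilation of that set (objective: alternative algorithm, same sets).
-- Both Pythons return a set; per the convention the ports build a PySem.Set.

-- ===== PORT A =====
def inflate_blocked (blocked : List (Int × Int)) (w : Int) (h_ : Int) (margin : Int) : List (Int × Int) :=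
  if margin ≤ 0 then PySem.Set.ofList blocked
  else
    blocked.foldl (fun inflated p =>
      (PySem.List.pyRange (-margin) (margin + 1) 1).foldl (fun inf dy =>
        (PySem.List.pyRange (-margin) (margin + 1) 1).foldl (fun inf dx =>
          let nx := p.1 + dx
          let ny := p.2 + dy
          if (0 ≤ nx ∧ nx < w) ∧ (0 ≤ ny ∧ ny < h_) then PySem.Set.add inf (nx, ny) else inf)
          inf) inflated)
      (PySem.Set.ofList blocked)

-- ===== PORT B =====
def inflate_blocked_alt (blocked : List (Int × Int)) (w : Int) (h_ : Int) (margin : Int) : List (Int × Int) :=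
  if margin ≤ 0 then PySem.Set.ofList blocked
  else
    let tall : PySem.Set (Int × Int) :=
      blocked.foldl (fun t p =>
        (PySem.List.pyRange (max (p.2 - margin) 0) (min (p.2 + margin + 1) h_) 1).foldl
          (fun t ny => PySem.Set.add t (p.1, ny)) t) PySem.Set.empty
    tall.foldl (fun inf q =>
      (PySem.List.pyRange (max (q.1 - margin) 0) (min (q.1 + margin + 1) w) 1).foldl
        (fun inf nx => PySem.Set.add inf (nx, q.2)) inf) (PySem.Set.ofList blocked)

-- ===== PRECONDITION & SPEC =====
def Spec_inflate_blocked (blocked : List (Int × Int)) (w : Int) (h_ : Int) (margin : Int) (out : List (Int × Int)) : Prop := out = inflate_blocked_alt blocked w h_ margin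
instance (blocked : List (Int × Int)) (w : Int) (h_ : Int) (margin : Int) (out : List (Int × Int)) : Decidable (Spec_inflate_blocked blocked w h_ margin out) := by unfold Spec_inflate_blocked; infer_instance

-- ===== CLAIM (what is proved, stated in full; the proofs are below) =====
def Claim_equal_inflate_blocked : Prop := ∀ (blocked : List (Int × Int)) (w : Int) (h_ : Int) (margin : Int), Dom_inflate_blocked blocked w h_ margin → Spec_inflate_blocked blocked w h_ margin (inflate_blocked blocked w h_ margin)

-- ===== LEMMAS AND PROOFS =====

-- the clipped vertical column of a cell, as pairs (stage-1 contribution)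
def pvCol (h_ margin : Int) (p : Int × Int) : List (Int × Int) :=
  (PySem.List.pyRange (max (p.2 - margin) 0) (min (p.2 + margin + 1) h_) 1).map (fun ny => (p.1, ny))

-- the clipped horizontal row of a cell, as pairs (stage-2 contribution)
def pvRow (w margin : Int) (q : Int × Int) : List (Int × Int) :=
  (PySem.List.pyRange (max (q.1 - margin) 0) (min (q.1 + margin + 1) w) 1).map (fun nx => (nx, q.2))

-- the elements of l that are new w.r.t. already-seen t, in first-occurrence order
def pvNew (t : List (Int × Int)) : List (Int × Int) → List (Int × Int)
  | [] => []
  | y :: ys => if y ∈ t then pvNew t ys else y :: pvNew (t ++ [y]) ys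

-- pointwise-equal step functions fold alike
theorem foldl_congr' {α β : Type} (l : List β) (f g : α → β → α) (s : α)
    (h : ∀ s x, f s x = g s x) : l.foldl f s = l.foldl g s := by
  have : f = g := funext fun a => funext (h a)
  rw [this]

-- range shift: adding c to every element of range(a,b) gives range(c+a,c+b)
theorem pyRange_map_add (c a b : Int) :
    (PySem.List.pyRange a b 1).map (fun t => c + t) = PySem.List.pyRange (c + a) (c + b) 1 := by
  rw [PySem.List.pyRange_one, PySem.List.pyRange_one, List.map_map]
  have : c + b - (c + a) = b - a := by ring
  rw [this]
  apply List.map_congr_left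
  intro k _
  simp; ring

-- filtering a unit-step range by an interval clips its ends
theorem filter_pyRange (lo hi : Int) (p : Int → Bool)
    (hp : ∀ t, p t = (decide (lo ≤ t) && decide (t < hi))) :
    ∀ (a b : Int), (PySem.List.pyRange a b 1).filter p
      = PySem.List.pyRange (max a lo) (min b hi) 1 := by
  intro a b
  by_cases hab : b ≤ a
  · rw [PySem.List.pyRange_one_eq_nil hab, PySem.List.pyRange_one_eq_nil (by omega)]
    rfl
  · have hab' : a < b := by omega
    rw [PySem.List.pyRange_one_cons hab', List.filter_cons]
    have IH := filter_pyRange lo hi p hp (a+1) b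
    by_cases hpa : lo ≤ a ∧ a < hi
    · have : p a = true := by rw [hp]; simp [hpa.1, hpa.2]
      rw [this, if_pos rfl, IH]
      rw [show max a lo = a by omega, show max (a+1) lo = a + 1 by omega,
        show PySem.List.pyRange a (min b hi) 1 = a :: PySem.List.pyRange (a+1) (min b hi) 1 from
          PySem.List.pyRange_one_cons (by omega)]
    · have : p a = false := by
        rw [hp]
        rcases Decidable.not_and_iff_or_not.mp hpa with h | h <;> simp <;> omega
      rw [this]
      simp only [Bool.false_eq_true, if_false]
      rw [IH]
      rcases Decidable.not_and_iff_or_not.mp hpa with h | h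
      · rw [show max a lo = lo by omega, show max (a+1) lo = lo by omega]
      · rw [PySem.List.pyRange_one_eq_nil (by omega), PySem.List.pyRange_one_eq_nil (by omega)]
termination_by a b => (b - a).toNat
decreasing_by omega

-- folding a guarded step over a unit-step range = folding the step over the clipped range
theorem foldl_ite_clip {α : Type} (F : α → Int → α) (lo hi a b : Int) (s : α) :
    (PySem.List.pyRange a b 1).foldl (fun s t => if lo ≤ t ∧ t < hi then F s t else s) s
      = (PySem.List.pyRange (max a lo) (min b hi) 1).foldl F s := by
  rw [← filter_pyRange lo hi (fun t => decide (lo ≤ t) && decide (t < hi)) (fun _ => rfl) a b,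
    List.foldl_filter]
  apply foldl_congr'
  intro s' t
  by_cases h : lo ≤ t ∧ t < hi
  · simp [h.1, h.2]
  · rcases Decidable.not_and_iff_or_not.mp h with h | h <;> simp [h]

-- a fold whose body never fires is the identity
theorem foldl_id {α β : Type} (l : List β) (s : α) :
    l.foldl (fun s _ => s) s = s := by
  induction l with
  | nil => rfl
  | cons x xs ih => simp [ih]

-- per-cell: A's guarded double loop = updating by the cell's clipped column flat-mapped through rows
theorem percell_eq (w h_ margin x y : Int) (s : PySem.Set (Int × Int)) :
    (PySem.List.pyRange (-margin) (margin + 1) 1).foldl (fun inf dy =>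
        (PySem.List.pyRange (-margin) (margin + 1) 1).foldl (fun inf dx =>
          if (0 ≤ x + dx ∧ x + dx < w) ∧ (0 ≤ y + dy ∧ y + dy < h_) then
            PySem.Set.add inf (x + dx, y + dy) else inf) inf) s
      = PySem.Set.update s ((pvCol h_ margin (x, y)).flatMap (pvRow w margin)) := by
  have shiftx : ∀ (inf : PySem.Set (Int × Int)) (ny : Int),
      (PySem.List.pyRange (-margin) (margin + 1) 1).foldl (fun inf dx =>
          if (0 ≤ x + dx ∧ x + dx < w) ∧ (0 ≤ ny ∧ ny < h_) then
            PySem.Set.add inf (x + dx, ny) else inf) inf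
        = (PySem.List.pyRange (x - margin) (x + margin + 1) 1).foldl (fun inf nx =>
          if (0 ≤ nx ∧ nx < w) ∧ (0 ≤ ny ∧ ny < h_) then PySem.Set.add inf (nx, ny) else inf) inf := by
    intro inf ny
    have e : PySem.List.pyRange (x - margin) (x + margin + 1) 1
        = (PySem.List.pyRange (-margin) (margin + 1) 1).map (fun t => x + t) := by
      rw [pyRange_map_add x (-margin) (margin + 1)]
      congr 1; ring
    rw [e, List.foldl_map]
  have shifty : PySem.List.pyRange (y - margin) (y + margin + 1) 1
      = (PySem.List.pyRange (-margin) (margin + 1) 1).map (fun t => y + t) := by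
    rw [pyRange_map_add y (-margin) (margin + 1)]
    congr 1; ring
  calc
    (PySem.List.pyRange (-margin) (margin + 1) 1).foldl (fun inf dy =>
        (PySem.List.pyRange (-margin) (margin + 1) 1).foldl (fun inf dx =>
          if (0 ≤ x + dx ∧ x + dx < w) ∧ (0 ≤ y + dy ∧ y + dy < h_) then
            PySem.Set.add inf (x + dx, y + dy) else inf) inf) s
      = (PySem.List.pyRange (y - margin) (y + margin + 1) 1).foldl (fun inf ny =>
          (PySem.List.pyRange (x - margin) (x + margin + 1) 1).foldl (fun inf nx =>
            if (0 ≤ nx ∧ nx < w) ∧ (0 ≤ ny ∧ ny < h_) then PySem.Set.add inf (nx, ny) else inf) inf) s := by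
        rw [shifty, List.foldl_map]
        apply foldl_congr'
        intro s' dy
        exact shiftx s' (y + dy)
    _ = (PySem.List.pyRange (y - margin) (y + margin + 1) 1).foldl (fun inf ny =>
          if 0 ≤ ny ∧ ny < h_ then
            (PySem.List.pyRange (max (x - margin) 0) (min (x + margin + 1) w) 1).foldl
              (fun inf nx => PySem.Set.add inf (nx, ny)) inf
          else inf) s := by
        apply foldl_congr'
        intro s' ny
        by_cases hy : 0 ≤ ny ∧ ny < h_
        · rw [if_pos hy, ← foldl_ite_clip (fun inf nx => PySem.Set.add inf (nx, ny)) 0 w]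
          apply foldl_congr'
          intro s'' nx
          by_cases hx : 0 ≤ nx ∧ nx < w
          · rw [if_pos ⟨hx, hy⟩, if_pos hx]
          · rw [if_neg (fun hc => hx hc.1), if_neg hx]
        · rw [if_neg hy]
          rw [show (fun (inf : PySem.Set (Int × Int)) (nx : Int) =>
              if (0 ≤ nx ∧ nx < w) ∧ (0 ≤ ny ∧ ny < h_) then PySem.Set.add inf (nx, ny) else inf)
              = (fun inf _ => inf) from ?_]
          · exact foldl_id _ _
          · funext inf nx
            rw [if_neg (fun hc => hy hc.2)]
    _ = PySem.Set.update s ((pvCol h_ margin (x, y)).flatMap (pvRow w margin)) := by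
        unfold pvCol pvRow PySem.Set.update
        rw [List.flatMap_map, List.foldl_flatMap]
        simp only [List.foldl_map]
        rw [← foldl_ite_clip (fun inf ny =>
          (PySem.List.pyRange (max (x - margin) 0) (min (x + margin + 1) w) 1).foldl
            (fun inf nx => PySem.Set.add inf (nx, ny)) inf) 0 h_ (y - margin) (y + margin + 1) s]

-- folding Set.add appends exactly the new elements
theorem foldl_add_eq_pvNew : ∀ (l t : List (Int × Int)),
    l.foldl PySem.Set.add t = t ++ pvNew t l := by
  intro l
  induction l with
  | nil => intro t; simp [pvNew]
  | cons y ys ih =>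
    intro t
    simp only [List.foldl_cons, pvNew]
    by_cases hy : y ∈ t
    · rw [PySem.Set.add_of_mem hy, if_pos hy, ih]
    · rw [PySem.Set.add_of_not_mem hy, if_neg hy, ih, List.append_assoc]
      rfl

-- updating with a list of already-present elements is a no-op
theorem update_of_subset (xs : List (Int × Int)) :
    ∀ (s : PySem.Set (Int × Int)), (∀ z ∈ xs, z ∈ s) → PySem.Set.update s xs = s := by
  induction xs with
  | nil => intro s _; rfl
  | cons x xs ih =>
    intro s h
    rw [PySem.Set.update_cons, PySem.Set.add_of_mem (h x (by simp)), ih s (fun z hz => h z (by simp [hz]))]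

-- skipping duplicates of the index list does not change the flat-mapped Set.update
theorem update_flatMap_pvNew (f : (Int × Int) → List (Int × Int)) :
    ∀ (l t : List (Int × Int)) (s : PySem.Set (Int × Int)),
    (∀ y ∈ t, ∀ z ∈ f y, z ∈ s) →
    PySem.Set.update s (l.flatMap f) = PySem.Set.update s ((pvNew t l).flatMap f) := by
  intro l
  induction l with
  | nil => intro t s _; rfl
  | cons y ys ih =>
    intro t s h
    rw [List.flatMap_cons, PySem.Set.update_append]
    by_cases hy : y ∈ t
    · rw [update_of_subset _ _ (h y hy)]
      rw [pvNew, if_pos hy]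
      exact ih t s h
    · rw [pvNew, if_neg hy, List.flatMap_cons, PySem.Set.update_append]
      apply ih (t ++ [y])
      intro y' hy' z hz
      rcases List.mem_append.mp hy' with h1 | h1
      · exact (PySem.Set.mem_update _ _ _).mpr (Or.inl (h y' h1 z hz))
      · have : y' = y := by simpa using h1
        subst this
        exact (PySem.Set.mem_update _ _ _).mpr (Or.inr hz)

-- ===== VERDICT (by name: the statement is the Claim_ definition above) =====
theorem inflate_blocked_spec : Claim_equal_inflate_blocked := by
  intro blocked w h_ margin _
  unfold Spec_inflate_blocked inflate_blocked inflate_blocked_alt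
  by_cases hm : margin ≤ 0
  · rw [if_pos hm, if_pos hm]
  · rw [if_neg hm, if_neg hm]
    -- A's side: fold of per-cell squares = one update by the flattened column-of-rows list
    have hA : blocked.foldl (fun inflated p =>
        (PySem.List.pyRange (-margin) (margin + 1) 1).foldl (fun inf dy =>
          (PySem.List.pyRange (-margin) (margin + 1) 1).foldl (fun inf dx =>
            let nx := p.1 + dx
            let ny := p.2 + dy
            if (0 ≤ nx ∧ nx < w) ∧ (0 ≤ ny ∧ ny < h_) then PySem.Set.add inf (nx, ny) else inf)
            inf) inflated) (PySem.Set.ofList blocked)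
        = PySem.Set.update (PySem.Set.ofList blocked)
            ((blocked.flatMap (pvCol h_ margin)).flatMap (pvRow w margin)) := by
      rw [List.flatMap_assoc]
      unfold PySem.Set.update
      rw [List.foldl_flatMap]
      apply foldl_congr'
      intro s p
      have := percell_eq w h_ margin p.1 p.2 s
      unfold PySem.Set.update at this
      exact this
    rw [hA]
    -- B's side: tall = pvNew [] (flattened columns); B = update by tall's rows
    have htall : blocked.foldl (fun t p =>
        (PySem.List.pyRange (max (p.2 - margin) 0) (min (p.2 + margin + 1) h_) 1).foldl
          (fun t ny => PySem.Set.add t (p.1, ny)) t) PySem.Set.empty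
        = pvNew [] (blocked.flatMap (pvCol h_ margin)) := by
      have step : ∀ (t : PySem.Set (Int × Int)) (p : Int × Int),
          (PySem.List.pyRange (max (p.2 - margin) 0) (min (p.2 + margin + 1) h_) 1).foldl
            (fun t ny => PySem.Set.add t (p.1, ny)) t
          = (pvCol h_ margin p).foldl PySem.Set.add t := by
        intro t p
        unfold pvCol
        rw [List.foldl_map]
      rw [foldl_congr' blocked _ (fun t p => (pvCol h_ margin p).foldl PySem.Set.add t) _ step,
        ← List.foldl_flatMap, foldl_add_eq_pvNew]
      rfl
    rw [htall]
    have hB : (pvNew [] (blocked.flatMap (pvCol h_ margin))).foldl (fun inf q =>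
        (PySem.List.pyRange (max (q.1 - margin) 0) (min (q.1 + margin + 1) w) 1).foldl
          (fun inf nx => PySem.Set.add inf (nx, q.2)) inf) (PySem.Set.ofList blocked)
        = PySem.Set.update (PySem.Set.ofList blocked)
            ((pvNew [] (blocked.flatMap (pvCol h_ margin))).flatMap (pvRow w margin)) := by
      unfold PySem.Set.update
      rw [List.foldl_flatMap]
      apply foldl_congr'
      intro s q
      unfold pvRow
      rw [List.foldl_map]
    rw [hB]
    exact update_flatMap_pvNew (pvRow w margin) (blocked.flatMap (pvCol h_ margin)) [] _
      (fun y hy => absurd hy (List.not_mem_nil))
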